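-- pv_equiv track=rewrite | github.com/kenzielizg/Cypher | PythonApplication1.py | wordLengths
-- ===== SOURCE A (Python) =====
-- def isAlphaNum(char, cyphNums=True):
-- 	"""
-- 	Checks if character is letter or number, returns bool
-- 	char: single character
-- 	cyphNums: if true, numbers return true, otherwise false
-- 	"""
-- 	#Equivalent string method str.isalnum()
-- 	if (char >= 'A' and char <= 'Z') or (char >= 'a' and char <='z') or (cyphNums and char >= '0' and char <= '9'):
-- 		return True
-- 	return False
--
-- def filterStringSpaced(text, incNums=True, toUpper=True):
-- 	"""
-- 	Used to filter a string but keeps spaces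
-- 	text: string to be filtered
-- 	incNums: whether number stay or are filtered, False filters numbers
-- 	toUpper: whether or not string is put into uppercase
-- 	returns filted string
-- 	"""
-- 	#Requires: isAlphaNum
-- 	newString=''
-- 	#like the other one but with spaces too, and also choice of uppercase
-- 	for char in text:
-- 		if isAlphaNum(char, incNums) or char == ' ':
-- 			if toUpper:
-- 				char = char.upper()
-- 			newString = newString + char
-- 	return newString
--
-- def findSpaces(text, filterPunc=True, incNums=True):
-- 	"""
-- 	find the indices of the spaces in a string and returns a list of them, the
-- 		last element of the list is the length of the string
-- 	text: string to be searched
-- 	filterPunc: will look at text as if no punctuaion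
-- 	incNums: whether of not numbers are included
-- 	"""
-- 	#Requires: filterStringSpaced
-- 	if filterPunc:
-- 		text = filterStringSpaced(text, incNums, toUpper=True)
--
-- 	spaceIndices = []
-- 	index = -1
--
-- 	#pseudo do-while cuz python doesn't have one
-- 	while True:
-- 		#finds the index of space and loops to find next
-- 		index = text.find(' ', index+1)
-- 		#when one cannot be found, str.find() returns -1 so the loop breaks
-- 		if index == -1:
-- 			break
-- 		spaceIndices = spaceIndices + [index]
-- 	#length text added as last element for reasons
-- 	spaceIndices = spaceIndices + [len(text)]
--
-- 	return spaceIndices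
--
-- def wordLengths(text, filterPunc=True, incNums=True):
-- 	"""
-- 	Determines the length of all words in a string
-- 	text: string
-- 	filterPunc: whether or not punctuation is counted toward to the length
-- 	incNums: whether or not numbers are counted as words or part of words
-- 	returns list of lengths in order
-- 	"""
-- 	#Requires: findSpaces
--
-- 	#Add -1 as first element to help get length of first word
-- 	spaceIndices = [-1] + findSpaces(text, filterPunc, incNums)
-- 	wordLen = []
--
-- 	#for range
-- 	numSpaces = len(spaceIndices)
--
-- 	#iterating through list of spaces, taking differences between adjacent elements -1
-- 	#	to get the lengths of the words. length 0 is ignored and indicates a double space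
-- 	for n in range(1,numSpaces):
-- 		length = spaceIndices[n] - spaceIndices[n-1] - 1
-- 		if length != 0:
-- 			wordLen = wordLen + [length]
-- 	return wordLen
-- ===== SOURCE B (Python) =====
-- def wordLengths(text, filterPunc=True, incNums=True):
-- 	"""
-- 	Determines the length of all words in a string
-- 	text: string
-- 	filterPunc: whether or not punctuation is counted toward to the length
-- 	incNums: whether or not numbers are counted as words or part of words
-- 	returns list of lengths in order
-- 	"""
-- 	if filterPunc:
-- 		# same filtering step as the original, written as one comprehension
-- 		text = ''.join(ch.upper() for ch in text
-- 		               if 'A' <= ch <= 'Z' or 'a' <= ch <= 'z'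
-- 		               or (incNums and '0' <= ch <= '9') or ch == ' ')
-- 	# split on the single space character and measure the non-empty pieces
-- 	return [len(w) for w in text.split(' ') if w != '']
-- ===== Notes on version B (the rewrite author's own statement) =====
-- stated objective: simpler
-- what changed: Replaces the find-loop that collects space indices plus the adjacent-difference loop with a direct split on ' ' and a comprehension over the non-empty pieces.
import Mathlib
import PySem

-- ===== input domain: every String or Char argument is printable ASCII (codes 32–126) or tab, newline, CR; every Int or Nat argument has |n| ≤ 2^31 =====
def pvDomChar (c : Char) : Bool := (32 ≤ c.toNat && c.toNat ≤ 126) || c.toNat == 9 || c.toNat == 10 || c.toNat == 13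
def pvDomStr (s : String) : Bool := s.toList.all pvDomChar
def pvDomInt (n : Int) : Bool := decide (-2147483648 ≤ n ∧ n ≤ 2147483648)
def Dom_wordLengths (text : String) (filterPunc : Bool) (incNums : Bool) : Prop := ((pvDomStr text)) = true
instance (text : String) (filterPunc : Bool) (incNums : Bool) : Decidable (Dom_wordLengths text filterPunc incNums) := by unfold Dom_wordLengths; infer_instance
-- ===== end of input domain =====

-- B replaces A's space-index find-loop and adjacent-difference arithmetic by splitting on ' '
-- and measuring the non-empty pieces (objective: simpler).

-- ===== PORT A =====
def isAlphaNumA (ch : Char) (cyphNums : Bool) : Bool :=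
  if ('A' ≤ ch ∧ ch ≤ 'Z') ∨ ('a' ≤ ch ∧ ch ≤ 'z') ∨ (cyphNums = true ∧ '0' ≤ ch ∧ ch ≤ '9') then
    true
  else
    false

def filterStringSpacedA (text : List Char) (incNums : Bool) (toUpper : Bool) : List Char :=
  text.foldl (fun newString ch =>
    if isAlphaNumA ch incNums || ch == ' ' then
      newString ++ [if toUpper then PySem.Chars.upperChar ch else ch]
    else newString) []

-- the pseudo do-while 'index = text.find(' ', index+1)' loop; fuel (length+1) only makes it
-- total: each found index is strictly larger than the previous one, so it never runs out
def findSpacesLoopA (t : List Char) : Nat → Int → List Int → List Int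
  | 0, _, acc => acc
  | fuel+1, index, acc =>
    let i := PySem.Chars.findFrom t [' '] (index+1) none
    if i = -1 then acc else findSpacesLoopA t fuel i (acc ++ [i])

def findSpacesA (text : List Char) (filterPunc : Bool) (incNums : Bool) : List Int :=
  let t := if filterPunc then filterStringSpacedA text incNums true else text
  findSpacesLoopA t (t.length + 1) (-1) [] ++ [(t.length : Int)]

def wordLengths (text : String) (filterPunc : Bool) (incNums : Bool) : List Int :=
  let spaceIndices : List Int := (-1) :: findSpacesA text.toList filterPunc incNums
  let numSpaces := spaceIndices.length
  (PySem.List.pyRange 1 (numSpaces : Int) 1).foldl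
    (fun wordLen n =>
      let length := PySem.List.pyGetD spaceIndices n 0 - PySem.List.pyGetD spaceIndices (n-1) 0 - 1
      if length ≠ 0 then wordLen ++ [length] else wordLen) []

-- ===== PORT B =====
def keepB (ch : Char) (incNums : Bool) : Bool :=
  ('A' ≤ ch && ch ≤ 'Z') || ('a' ≤ ch && ch ≤ 'z') || (incNums && ('0' ≤ ch && ch ≤ '9')) || ch == ' '

def filterSpacedB (text : List Char) (incNums : Bool) : List Char :=
  (text.filter (fun ch => keepB ch incNums)).map PySem.Chars.upperChar

def wordLengths_alt (text : String) (filterPunc : Bool) (incNums : Bool) : List Int :=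
  let t := if filterPunc then filterSpacedB text.toList incNums else text.toList
  ((t.splitOn ' ').filter (fun w => w ≠ [])).map (fun w => (w.length : Int))

-- ===== PRECONDITION & SPEC =====
def Spec_wordLengths (text : String) (filterPunc : Bool) (incNums : Bool) (out : List Int) : Prop := out = wordLengths_alt text filterPunc incNums
instance (text : String) (filterPunc : Bool) (incNums : Bool) (out : List Int) : Decidable (Spec_wordLengths text filterPunc incNums out) := by unfold Spec_wordLengths; infer_instance

-- ===== CLAIM (what is proved, stated in full; the proofs are below) =====
def Claim_equal_wordLengths : Prop := ∀ (text : String) (filterPunc : Bool) (incNums : Bool), Dom_wordLengths text filterPunc incNums → Spec_wordLengths text filterPunc incNums (wordLengths text filterPunc incNums)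

-- ===== LEMMAS AND PROOFS =====

/-- positions of ' ' in a character list, in increasing order -/
def spaceIdx : List Char → List Nat
  | [] => []
  | c :: cs => if c = ' ' then 0 :: (spaceIdx cs).map (· + 1) else (spaceIdx cs).map (· + 1)

/-- adjacent differences minus one, dropping zeros (A's last loop, prev-seeded) -/
def dnz : Int → List Int → List Int
  | _, [] => []
  | prev, x :: xs => if x - prev - 1 ≠ 0 then (x - prev - 1) :: dnz x xs else dnz x xs

/-- word lengths of a char list, with `k` characters of the current word already read -/
def wlenAux : List Char → Nat → List Int
  | [], k => if k = 0 then [] else [(k : Int)]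
  | c :: cs, k => if c = ' ' then (if k = 0 then [] else [(k : Int)]) ++ wlenAux cs 0 else wlenAux cs (k + 1)

theorem spaceIdx_cons_space (cs : List Char) :
    spaceIdx (' ' :: cs) = 0 :: (spaceIdx cs).map (· + 1) := by
  simp [spaceIdx]

theorem spaceIdx_cons_ne (c : Char) (cs : List Char) (hc : c ≠ ' ') :
    spaceIdx (c :: cs) = (spaceIdx cs).map (· + 1) := by
  simp [spaceIdx, hc]

theorem mem_spaceIdx (u : List Char) (j : Nat) : j ∈ spaceIdx u ↔ u[j]? = some ' ' := by
  induction u generalizing j with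
  | nil => simp [spaceIdx]
  | cons c cs ih =>
    cases j with
    | zero =>
      by_cases h : c = ' ' <;> simp [spaceIdx, h] <;> try (intro k _ hk; omega)
    | succ j =>
      by_cases h : c = ' ' <;> simp [spaceIdx, h, ih j]

theorem spaceIdx_lt_length (u : List Char) (j : Nat) (h : j ∈ spaceIdx u) : j < u.length := by
  have h1 := (mem_spaceIdx u j).1 h
  have h2 := List.getElem?_eq_some_iff.1 h1
  exact h2.1

theorem spaceIdx_pairwise (u : List Char) : (spaceIdx u).Pairwise (· < ·) := by
  induction u with
  | nil => simp [spaceIdx]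
  | cons c cs ih =>
    by_cases h : c = ' ' <;> simp [spaceIdx, h] <;>
      first
      | exact ⟨fun j _ => by omega, List.Pairwise.map _ (fun a b hab => by omega) ih⟩
      | exact List.Pairwise.map _ (fun a b hab => by omega) ih

theorem singleton_prefix_head? {a : Char} {u : List Char} : [a] <+: u ↔ u.head? = some a := by
  cases u with
  | nil => simp
  | cons b t => simp [List.cons_prefix_cons, eq_comm]

/-- `Chars.find` on `[' ']` is the head of `spaceIdx` (or -1). -/
theorem find_space (l : List Char) :
    PySem.Chars.find l [' '] = ((spaceIdx l).head?.map (fun j : Nat => (j : Int))).getD (-1) := by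
  cases hs : spaceIdx l with
  | nil =>
    simp only [List.head?_nil, Option.map_none, Option.getD_none]
    rw [PySem.Chars.find_eq_neg_one_iff]
    intro hinf
    have hm : ' ' ∈ l := hinf.subset (by simp)
    obtain ⟨j, hj, hje⟩ := List.mem_iff_getElem.1 hm
    have : j ∈ spaceIdx l := (mem_spaceIdx l j).2 (by rw [List.getElem?_eq_getElem hj, hje])
    rw [hs] at this; simp at this
  | cons j rest =>
    simp only [List.head?_cons, Option.map_some, Option.getD_some]
    have hjmem : l[j]? = some ' ' := (mem_spaceIdx l j).1 (by rw [hs]; exact List.mem_cons_self)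
    have hm : ' ' ∈ l := by
      obtain ⟨hlt, hg⟩ := List.getElem?_eq_some_iff.1 hjmem
      exact hg ▸ List.getElem_mem hlt
    have hinf : [' '] <:+: l := by
      obtain ⟨s, t, hst⟩ := List.append_of_mem hm
      exact ⟨s, t, by rw [hst]; simp⟩
    have h0 : 0 ≤ PySem.Chars.find l [' '] := (PySem.Chars.find_nonneg_iff _ _).2 hinf
    obtain ⟨hpre, hmin⟩ := PySem.Chars.find_spec h0
    set i := (PySem.Chars.find l [' ']).toNat with hi
    have hieq : l[i]? = some ' ' := by
      rw [← List.head?_drop]; exact singleton_prefix_head?.1 hpre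
    have himem : i ∈ spaceIdx l := (mem_spaceIdx l i).2 hieq
    rw [hs] at himem
    have hji : j ≤ i := by
      rcases List.mem_cons.1 himem with h | h
      · omega
      · have := (List.pairwise_cons.1 (hs ▸ spaceIdx_pairwise l)).1 i h
        omega
    have hij : ¬ (j < i) := by
      intro hlt
      exact hmin j hlt (singleton_prefix_head?.2 (by rw [List.head?_drop]; exact hjmem))
    omega

theorem spaceIdx_drop (u : List Char) (j : Nat) (rest : List Nat)
    (h : spaceIdx u = j :: rest) : rest = (spaceIdx (u.drop (j+1))).map (· + (j+1)) := by
  induction u generalizing j rest with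
  | nil => simp [spaceIdx] at h
  | cons c cs ih =>
    by_cases hc : c = ' '
    · simp [spaceIdx, hc] at h
      obtain ⟨rfl, rfl⟩ := h
      simp
    · simp [spaceIdx, hc] at h
      cases hcs : spaceIdx cs with
      | nil => rw [hcs] at h; simp at h
      | cons j' rest' =>
        rw [hcs] at h
        simp at h
        obtain ⟨rfl, rfl⟩ := h
        have hrec := ih j' rest' hcs
        subst hrec
        simp [List.map_map]

theorem dnz_shift (xs : List Int) (prev c : Int) :
    dnz (prev + c) (xs.map (· + c)) = dnz prev xs := by
  induction xs generalizing prev with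
  | nil => simp [dnz]
  | cons x xs ih =>
    simp only [List.map_cons, dnz]
    have harith : x + c - (prev + c) - 1 = x - prev - 1 := by ring
    rw [harith]
    split <;> rw [ih x]

theorem findSpacesLoopA_spec (t : List Char) (fuel : Nat) (k : Nat) (acc : List Int)
    (hk : k ≤ t.length) (hfuel : t.length + 1 - k ≤ fuel) :
    findSpacesLoopA t fuel ((k : Int) - 1) acc
      = acc ++ (spaceIdx (t.drop k)).map (fun j => ((k + j : Nat) : Int)) := by
  induction fuel generalizing k acc with
  | zero => omega
  | succ fuel ih =>
    rw [findSpacesLoopA]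
    have harg : (k : Int) - 1 + 1 = (k : Int) := by ring
    rw [harg]
    have hfind : PySem.Chars.findFrom t [' '] (k : Int) none
        = ((spaceIdx (t.drop k)).head?.map (fun j => ((k + j : Nat) : Int))).getD (-1) := by
      unfold PySem.Chars.findFrom
      have h1 : ¬ ((k : Int) < 0) := by omega
      have h2 : ¬ ((t.length : Int) < (k : Int)) := by omega
      simp only [h1, if_false, h2, if_false]
      rw [show ((t.length : Int)).toNat = t.length by omega, List.take_length,
        show ((k : Int)).toNat = k by omega]
      rw [find_space]
      cases hsd : spaceIdx (t.drop k) with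
      | nil => simp
      | cons j rest => simp
    rw [hfind]
    cases hsd : spaceIdx (t.drop k) with
    | nil => simp
    | cons j rest =>
      simp only [List.head?_cons, Option.map_some, Option.getD_some]
      have hjlt : j < t.length - k := by
        have := spaceIdx_lt_length (t.drop k) j (by rw [hsd]; exact List.mem_cons_self)
        simpa using this
      have hne : ¬ (((k + j : Nat) : Int) = -1) := by omega
      rw [if_neg hne]
      have harg2 : ((k + j : Nat) : Int) = ((k + j + 1 : Nat) : Int) - 1 := by push_cast; ring
      rw [harg2, ih (k + j + 1) (acc ++ [((k + j + 1 : Nat) : Int) - 1]) (by omega) (by omega)]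
      have hrest := spaceIdx_drop (t.drop k) j rest hsd
      have hdd : (t.drop k).drop (j+1) = t.drop (k + j + 1) := by
        rw [List.drop_drop]; congr 1
      rw [hdd] at hrest
      subst hrest
      have hmap : ∀ L : List Nat,
          L.map (fun j' : Nat => ((k + j + 1 + j' : Nat) : Int))
            = (L.map (· + (j + 1))).map (fun j0 : Nat => ((k + j0 : Nat) : Int)) := by
        intro L
        rw [List.map_map]
        apply List.map_congr_left
        intro a _
        simp only [Function.comp_apply]
        congr 1
        omega
      rw [List.append_assoc, List.singleton_append]
      simp only [List.map_cons]
      rw [← hmap (spaceIdx (t.drop (k + j + 1)))]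
      rw [show ((k + j + 1 : Nat) : Int) - 1 = ((k + j : Nat) : Int) by push_cast <;> ring]

theorem shift_list (cs : List Char) :
    ((spaceIdx cs).map (· + 1)).map (fun j : Nat => (j : Int)) ++ [((cs.length + 1 : Nat) : Int)]
      = (((spaceIdx cs).map (fun j : Nat => (j : Int))) ++ [(cs.length : Int)]).map (· + 1) := by
  simp only [List.map_map, List.map_append, List.map_cons, List.map_nil]
  congr 1

theorem dnz_eq_wlenAux (cs : List Char) (k : Nat) :
    dnz (-(1 + (k : Int))) ((spaceIdx cs).map (fun j : Nat => (j : Int)) ++ [(cs.length : Int)])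
      = wlenAux cs k := by
  induction cs generalizing k with
  | nil =>
    simp only [spaceIdx, List.map_nil, List.nil_append, List.length_nil, wlenAux,
      Nat.cast_zero, dnz]
    have h0 : (0 : Int) - -(1 + (k : Int)) - 1 = (k : Int) := by ring
    rw [h0]
    by_cases hk : k = 0
    · subst hk; simp [dnz]
    · rw [if_pos (by exact_mod_cast hk), if_neg hk]
  | cons c cs ih =>
    by_cases hc : c = ' '
    · subst hc
      rw [spaceIdx_cons_space]
      simp only [List.map_cons, Nat.cast_zero, List.cons_append, dnz, List.length_cons]
      have h1 : (0 : Int) - -(1 + (k : Int)) - 1 = (k : Int) := by ring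
      rw [h1]
      have htail : dnz (0 : Int)
          (((spaceIdx cs).map (· + 1)).map (fun j : Nat => (j : Int)) ++ [((cs.length + 1 : Nat) : Int)])
            = wlenAux cs 0 := by
        rw [shift_list, show (0 : Int) = -(1 + ((0 : Nat) : Int)) + 1 by norm_num, dnz_shift]
        exact ih 0
      rw [wlenAux, if_pos rfl]
      by_cases hk : k = 0
      · subst hk
        rw [if_neg (by norm_num), if_pos rfl, List.nil_append]
        exact htail
      · rw [if_pos (by exact_mod_cast hk), if_neg hk, htail]
        rfl
    · rw [spaceIdx_cons_ne c cs hc, wlenAux, if_neg hc, List.length_cons, ← ih (k + 1)]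
      rw [shift_list, show -(1 + (k : Int)) = -(1 + ((k + 1 : Nat) : Int)) + 1 by push_cast; ring,
        dnz_shift]

def headSplit : Nat → List (List Char) → List Int
  | _, [] => []
  | k, w :: ws => (if k + w.length = 0 then [] else [((k + w.length : Nat) : Int)])
      ++ (ws.filter (fun w => w ≠ [])).map (fun w => (w.length : Int))

theorem wlenAux_eq_headSplit (cs : List Char) (k : Nat) :
    wlenAux cs k = headSplit k (cs.splitOnP (· == ' ')) := by
  induction cs generalizing k with
  | nil => by_cases hk : k = 0 <;> simp [wlenAux, headSplit, hk]
  | cons c cs ih =>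
    by_cases hc : c = ' '
    · subst hc
      rw [wlenAux, if_pos rfl, List.splitOnP_cons, if_pos (show (' ' == ' ') = true by decide), ih 0]
      cases hsp : cs.splitOnP (· == ' ') with
      | nil => exact absurd hsp (List.splitOnP_ne_nil _ cs)
      | cons w ws =>
        have hR : headSplit k ([] :: w :: ws)
            = (if k = 0 then ([] : List Int) else [(k : Int)])
              ++ ((w :: ws).filter (fun w => w ≠ [])).map (fun w => (w.length : Int)) := by
          by_cases hk : k = 0 <;> simp [headSplit, hk]
        have hL : headSplit 0 (w :: ws)
            = ((w :: ws).filter (fun w => w ≠ [])).map (fun w => (w.length : Int)) := by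
          by_cases hw : w = []
          · subst hw; simp [headSplit]
          · have hlen : ¬ w.length = 0 := by simpa [List.length_eq_zero_iff] using hw
            simp [headSplit, hlen, hw, List.filter_cons]
        rw [hR, hL]
    · rw [wlenAux, if_neg hc, List.splitOnP_cons, if_neg (by simp [hc]), ih (k + 1)]
      cases hsp : cs.splitOnP (· == ' ') with
      | nil => exact absurd hsp (List.splitOnP_ne_nil _ cs)
      | cons w ws =>
        simp only [headSplit, List.modifyHead_cons, List.length_cons]
        rw [if_neg (by omega), if_neg (by omega)]
        congr 2
        omega

theorem wlenAux_eq_split (cs : List Char) (k : Nat) :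
    wlenAux cs k = (match cs.splitOnP (· == ' ') with
      | [] => []
      | w :: ws => (if k + w.length = 0 then [] else [((k + w.length : Nat) : Int)])
          ++ (ws.filter (fun w => w ≠ [])).map (fun w => (w.length : Int))) := by
  rw [wlenAux_eq_headSplit]
  cases cs.splitOnP (· == ' ') <;> rfl

theorem pyGetD_cons_pos (l : List Int) (a : Int) (n : Int) (d : Int) (h : 0 ≤ n) :
    PySem.List.pyGetD (a :: l) (n + 1) d = PySem.List.pyGetD l n d := by
  rw [show n = ((n.toNat : Nat) : Int) by omega,
    show ((n.toNat : Nat) : Int) + 1 = ((n.toNat + 1 : Nat) : Int) by push_cast; ring,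
    PySem.List.pyGetD_natCast, PySem.List.pyGetD_natCast]
  rfl

theorem pyRange_shift (a b : Int) :
    PySem.List.pyRange (a + 1) (b + 1) 1 = (PySem.List.pyRange a b 1).map (· + 1) := by
  rw [PySem.List.pyRange_one, PySem.List.pyRange_one, show b + 1 - (a + 1) = b - a by ring,
    List.map_map]
  apply List.map_congr_left; intro n _; simp only [Function.comp_apply]; ring

theorem final_loop_spec (xs : List Int) (a : Int) (acc : List Int) :
    (PySem.List.pyRange 1 (((a :: xs).length : Nat) : Int) 1).foldl
      (fun wordLen n =>
        if PySem.List.pyGetD (a :: xs) n 0 - PySem.List.pyGetD (a :: xs) (n-1) 0 - 1 ≠ 0 then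
          wordLen ++ [PySem.List.pyGetD (a :: xs) n 0 - PySem.List.pyGetD (a :: xs) (n-1) 0 - 1]
        else wordLen) acc
    = acc ++ dnz a xs := by
  induction xs generalizing a acc with
  | nil =>
    rw [dnz]
    simp [PySem.List.pyRange_one_eq_nil]
  | cons x xs ih =>
    have hb : (((a :: x :: xs).length : Nat) : Int) = ((xs.length : Int) + 2) := by
      simp; ring
    rw [hb, PySem.List.pyRange_one_cons (by omega), List.foldl_cons]
    have g1 : PySem.List.pyGetD (a :: x :: xs) 1 0 = x := by
      rw [show (1 : Int) = (0 : Int) + 1 by ring, pyGetD_cons_pos _ _ _ _ le_rfl,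
        show (0 : Int) = ((0 : Nat) : Int) by norm_num, PySem.List.pyGetD_natCast]
      rfl
    have g0 : PySem.List.pyGetD (a :: x :: xs) (1 - 1) 0 = a := by
      rw [show (1 : Int) - 1 = ((0 : Nat) : Int) by norm_num, PySem.List.pyGetD_natCast]
      rfl
    rw [g1, g0]
    have hshift : PySem.List.pyRange (1 + 1) ((xs.length : Int) + 2) 1
        = (PySem.List.pyRange 1 ((xs.length : Int) + 1) 1).map (· + 1) := by
      rw [show (xs.length : Int) + 2 = ((xs.length : Int) + 1) + 1 by ring, pyRange_shift]
    rw [hshift, List.foldl_map]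
    have hext : List.foldl
        (fun (wordLen : List Int) (n : Int) =>
          if PySem.List.pyGetD (a :: x :: xs) (n + 1) 0 - PySem.List.pyGetD (a :: x :: xs) (n + 1 - 1) 0 - 1 ≠ 0 then
            wordLen ++ [PySem.List.pyGetD (a :: x :: xs) (n + 1) 0 - PySem.List.pyGetD (a :: x :: xs) (n + 1 - 1) 0 - 1]
          else wordLen)
        (if x - a - 1 ≠ 0 then acc ++ [x - a - 1] else acc)
        (PySem.List.pyRange 1 ((xs.length : Int) + 1) 1)
        = List.foldl
        (fun (wordLen : List Int) (n : Int) =>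
          if PySem.List.pyGetD (x :: xs) n 0 - PySem.List.pyGetD (x :: xs) (n - 1) 0 - 1 ≠ 0 then
            wordLen ++ [PySem.List.pyGetD (x :: xs) n 0 - PySem.List.pyGetD (x :: xs) (n - 1) 0 - 1]
          else wordLen)
        (if x - a - 1 ≠ 0 then acc ++ [x - a - 1] else acc)
        (PySem.List.pyRange 1 ((xs.length : Int) + 1) 1) := by
      apply PySem.List.foldl_congr_mem
      intro acc' n hmem
      have hn := (PySem.List.mem_pyRange_one.1 hmem).1
      have e1 : PySem.List.pyGetD (a :: x :: xs) (n + 1) 0 = PySem.List.pyGetD (x :: xs) n 0 :=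
        pyGetD_cons_pos _ _ n _ (by omega)
      have e2 : PySem.List.pyGetD (a :: x :: xs) (n + 1 - 1) 0
          = PySem.List.pyGetD (x :: xs) (n - 1) 0 := by
        rw [show n + 1 - 1 = (n - 1) + 1 by ring, pyGetD_cons_pos _ _ (n - 1) _ (by omega)]
      rw [e1, e2]
    rw [hext]
    have hb2 : ((xs.length : Int) + 1) = (((x :: xs).length : Nat) : Int) := by
      simp
    rw [hb2, ih x]
    rw [dnz]
    split
    · rw [List.append_assoc]; rfl
    · rfl

theorem filter_eq (text : List Char) (incNums : Bool) :
    filterStringSpacedA text incNums true = filterSpacedB text incNums := by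
  unfold filterStringSpacedA filterSpacedB
  rw [PySem.List.foldl_append_if (p := fun ch => isAlphaNumA ch incNums || ch == ' ')
    (f := fun ch => if true then PySem.Chars.upperChar ch else ch)]
  rw [List.nil_append]
  rw [show (fun ch => if true then PySem.Chars.upperChar ch else ch) = PySem.Chars.upperChar from
    by funext ch; simp]
  congr 1
  apply List.filter_congr
  intro ch _
  unfold isAlphaNumA keepB
  by_cases hP : ('A' ≤ ch ∧ ch ≤ 'Z') ∨ ('a' ≤ ch ∧ ch ≤ 'z') ∨ (incNums = true ∧ '0' ≤ ch ∧ ch ≤ '9')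
  · rw [if_pos hP, Bool.eq_iff_iff]
    simp only [Bool.true_or, Bool.or_eq_true, Bool.and_eq_true, decide_eq_true_eq, beq_iff_eq,
      true_iff]
    tauto
  · rw [if_neg hP, Bool.eq_iff_iff]
    simp only [Bool.false_or, Bool.or_eq_true, Bool.and_eq_true, decide_eq_true_eq, beq_iff_eq]
    tauto

-- ===== VERDICT (by name: the statement is the Claim_ definition above) =====
theorem wordLengths_spec : Claim_equal_wordLengths := by
  intro text filterPunc incNums _
  show wordLengths text filterPunc incNums = wordLengths_alt text filterPunc incNums
  simp only [wordLengths, wordLengths_alt, findSpacesA]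
  rw [filter_eq]
  generalize (if filterPunc = true then filterSpacedB text.toList incNums else text.toList) = t
  rw [show ((-1 : Int) :: (findSpacesLoopA t (t.length + 1) (-1) [] ++ [(t.length : Int)]))
      = (-1 : Int) :: (findSpacesLoopA t (t.length + 1) (-1) [] ++ [(t.length : Int)]) from rfl]
  rw [final_loop_spec (findSpacesLoopA t (t.length + 1) (-1) [] ++ [(t.length : Int)]) (-1) []]
  have loop0 : findSpacesLoopA t (t.length + 1) (-1) [] = (spaceIdx t).map (fun j : Nat => (j : Int)) := by
    have h := findSpacesLoopA_spec t (t.length + 1) 0 [] (by omega) (by omega)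
    simpa using h
  rw [loop0, List.nil_append]
  have hd : dnz (-1) ((spaceIdx t).map (fun j : Nat => (j : Int)) ++ [(t.length : Int)]) = wlenAux t 0 := by
    have h := dnz_eq_wlenAux t 0
    simpa using h
  rw [hd, wlenAux_eq_split]
  rw [show t.splitOn ' ' = t.splitOnP (· == ' ') from rfl]
  cases hsp : t.splitOnP (· == ' ') with
  | nil => exact absurd hsp (List.splitOnP_ne_nil _ t)
  | cons w ws =>
    simp only [Nat.zero_add]
    by_cases hw : w = []
    · subst hw
      simp
    · have hlen : ¬ (w.length = 0) := by simpa [List.length_eq_zero_iff] using hw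
      rw [if_neg (by omega), List.filter_cons, if_pos (by simp [hw]), List.map_cons]
      simp
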